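-- pv_equiv track=rewrite | github.com/sakshamahluwalia/Tower-of-Anne-Hoy | tour.py | optimal_i
-- ===== SOURCE A (Python) =====
-- def optimal_moves(num_disks):
--     """Helper function to find the optimal moves for a given number of disks
--
--      @param int num_disks:
--         number of disks
--     """
--     n_list = []
--     n_list2 = []
--     if num_disks == 1:
--         return 1
--     else:
--         for i in range(1, num_disks):
--             result = (2 * optimal_moves(num_disks - i) + (2 ** i) - 1)
--             n_list.append(result)
--             n_list2.append(i)
--     return min(n_list)
--
-- def optimal_i(disks):
--     """Helper function to find the optimal i for a given number of disks
--
--      @param int disks: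
--         number of disks
--     """
--     n_list = []
--     n_list2 = []
--     if disks == 1:
--         return 1
--     else:
--         for i in range(1, disks):
--             result = (2 * optimal_moves(disks - i) + (2 ** i) - 1)
--             n_list.append(result)
--             n_list2.append(i)
--     return n_list2[n_list.index(min(n_list))]
-- ===== SOURCE B (Python) =====
-- def optimal_i(disks):
--     """Optimal Frame-Stewart split i for `disks` disks, via an O(n^2) DP table
--     instead of the exponential recursion."""
--     if disks == 1:
--         return 1
--     m = [0, 1]  # m[k] = optimal number of moves for k disks (k >= 1)
--     for k in range(2, disks):
--         m.append(min(2 * m[k - i] + 2 ** i - 1 for i in range(1, k)))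
--     costs = [2 * m[disks - i] + 2 ** i - 1 for i in range(1, disks)]
--     return 1 + costs.index(min(costs))
-- ===== Notes on version B (the rewrite author's own statement) =====
-- stated objective: faster
-- what changed: replaces the exponential optimal_moves recursion with a bottom-up O(n^2) DP table of move counts, then one scan picking the first minimizing split
import Mathlib
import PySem

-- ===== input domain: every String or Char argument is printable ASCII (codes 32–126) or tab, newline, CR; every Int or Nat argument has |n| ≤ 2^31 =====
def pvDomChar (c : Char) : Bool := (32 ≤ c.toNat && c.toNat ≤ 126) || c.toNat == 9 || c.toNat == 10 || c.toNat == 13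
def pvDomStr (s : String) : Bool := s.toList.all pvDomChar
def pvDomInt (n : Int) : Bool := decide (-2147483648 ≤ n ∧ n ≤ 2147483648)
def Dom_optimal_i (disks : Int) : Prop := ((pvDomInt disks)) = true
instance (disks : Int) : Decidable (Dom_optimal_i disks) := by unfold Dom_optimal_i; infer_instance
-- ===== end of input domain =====

-- B replaces A's exponential optimal_moves recursion by a bottom-up DP table of move counts (objective: faster).

-- ===== PORT A =====
-- optimal_moves recurses on a strictly smaller positive argument; ported with fuel = num_disks.toNat,
-- which suffices wherever the Python returns; min([]) raises ValueError in Python, so the `.getD 0`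
-- branches are only reached outside Pre_.
def optimal_moves_fuel : Nat → Int → Int
  | 0, _ => 0
  | f + 1, num_disks =>
    if num_disks == 1 then 1
    else
      let n_list := (PySem.List.pyRange 1 num_disks 1).map
        (fun i => 2 * optimal_moves_fuel f (num_disks - i) + 2 ^ i.toNat - 1)
      (PySem.List.min? n_list (fun x => x)).getD 0

def optimal_moves (num_disks : Int) : Int := optimal_moves_fuel num_disks.toNat num_disks

def optimal_i (disks : Int) : Int :=
  if disks == 1 then 1
  else
    let n_list := (PySem.List.pyRange 1 disks 1).map
      (fun i => 2 * optimal_moves (disks - i) + 2 ^ i.toNat - 1)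
    let n_list2 := PySem.List.pyRange 1 disks 1
    match PySem.List.min? n_list (fun x => x) with
    | none => 0      -- Python: min([]) raises ValueError (outside Pre_)
    | some mn =>
      match PySem.List.index? n_list mn with
      | none => 0
      | some j => (PySem.List.pyGet? n_list2 (j : Int)).getD 0

-- ===== PORT B =====
def optimal_i_alt (disks : Int) : Int :=
  if disks == 1 then 1
  else
    let m := (PySem.List.pyRange 2 disks 1).foldl
      (fun m k => m ++ [(PySem.List.min? ((PySem.List.pyRange 1 k 1).map
          (fun i => 2 * (PySem.List.pyGet? m (k - i)).getD 0 + 2 ^ i.toNat - 1)) (fun x => x)).getD 0])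
      ([0, 1] : List Int)
    let costs := (PySem.List.pyRange 1 disks 1).map
      (fun i => 2 * (PySem.List.pyGet? m (disks - i)).getD 0 + 2 ^ i.toNat - 1)
    match PySem.List.min? costs (fun x => x) with
    | none => 0      -- Python: min([]) raises ValueError (outside Pre_)
    | some mn => 1 + ((PySem.List.index? costs mn).getD 0 : Int)

-- ===== PRECONDITION & SPEC =====
-- Pre_ excludes only disks ≤ 0, where both Pythons raise ValueError (min() of an empty sequence).
def Pre_optimal_i (disks : Int) : Prop := 1 ≤ disks
instance (disks : Int) : Decidable (Pre_optimal_i disks) := by unfold Pre_optimal_i; infer_instance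
def pvWitness_optimal_i : Int := (3)

def Spec_optimal_i (disks : Int) (out : Int) : Prop := out = optimal_i_alt disks
instance (disks : Int) (out : Int) : Decidable (Spec_optimal_i disks out) := by unfold Spec_optimal_i; infer_instance

-- ===== CLAIM (what is proved, stated in full; the proofs are below) =====
def Claim_equal_optimal_i : Prop := ∀ (disks : Int), Dom_optimal_i disks → Pre_optimal_i disks → Spec_optimal_i disks (optimal_i disks)

-- ===== LEMMAS AND PROOFS =====

-- fuel irrelevance: any fuel ≥ d.toNat computes the same value
theorem moves_fuel_irrel : ∀ (n f g : Nat) (d : Int), 1 ≤ d → d.toNat ≤ n →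
    d.toNat ≤ f → d.toNat ≤ g → optimal_moves_fuel f d = optimal_moves_fuel g d := by
  intro n
  induction n with
  | zero => intro f g d hd hn _ _; omega
  | succ n ih =>
    intro f g d hd hn hf hg
    obtain ⟨f', rfl⟩ : ∃ f', f = f' + 1 := ⟨f - 1, by omega⟩
    obtain ⟨g', rfl⟩ : ∃ g', g = g' + 1 := ⟨g - 1, by omega⟩
    simp only [optimal_moves_fuel]
    by_cases h1 : d = 1
    · simp [h1]
    · have hne : (d == 1) = false := by simp [h1]
      simp only [hne, Bool.false_eq_true, if_false]
      congr 2
      apply List.map_congr_left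
      intro i hi
      rw [PySem.List.mem_pyRange_one] at hi
      rw [ih f' g' (d - i) (by omega) (by omega) (by omega) (by omega)]

theorem optimal_moves_one : optimal_moves 1 = 1 := by decide

-- the recurrence the DP table implements
theorem optimal_moves_rec (d : Int) (hd : 2 ≤ d) :
    optimal_moves d = (PySem.List.min? ((PySem.List.pyRange 1 d 1).map
      (fun i => 2 * optimal_moves (d - i) + 2 ^ i.toNat - 1)) (fun x => x)).getD 0 := by
  have hne : (d == 1) = false := by simp; omega
  obtain ⟨t, ht⟩ : ∃ t, d.toNat = t + 1 := ⟨d.toNat - 1, by omega⟩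
  conv_lhs => rw [optimal_moves, ht]
  simp only [optimal_moves_fuel, hne, Bool.false_eq_true, if_false]
  congr 2
  apply List.map_congr_left
  intro i hi
  rw [PySem.List.mem_pyRange_one] at hi
  rw [show optimal_moves (d - i) = optimal_moves_fuel (d - i).toNat (d - i) from rfl]
  rw [moves_fuel_irrel t t (d - i).toNat (d - i) (by omega) (by omega) (by omega) (by omega)]

-- the table B's foldl builds: m[k] = optimal_moves k for 1 ≤ k < d
def mSpec (d : Int) : List Int := [0, 1] ++ (PySem.List.pyRange 2 d 1).map optimal_moves

theorem mSpec_get (d j : Int) (h1 : 1 ≤ j) (hj : j < d) :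
    (PySem.List.pyGet? (mSpec d) j).getD 0 = optimal_moves j := by
  rw [PySem.List.pyGet?_of_nonneg (mSpec d) (by omega)]
  unfold mSpec
  by_cases hj1 : j = 1
  · subst hj1; simp [optimal_moves_one]
  · have h2 : 2 ≤ j.toNat := by omega
    rw [List.getElem?_append_right (by simp; omega)]
    simp only [List.length_cons, List.length_nil]
    have hlt : j.toNat - 2 < ((PySem.List.pyRange 2 d 1).map optimal_moves).length := by
      simp [PySem.List.length_pyRange_one]; omega
    rw [List.getElem?_eq_getElem hlt]
    simp only [List.getElem_map, PySem.List.getElem_pyRange_one, Option.getD_some]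
    congr 1
    omega

theorem foldl_table_aux : ∀ (n : Nat) (d : Int), 2 ≤ d → (d - 2).toNat ≤ n →
    (PySem.List.pyRange 2 d 1).foldl
      (fun m k => m ++ [(PySem.List.min? ((PySem.List.pyRange 1 k 1).map
          (fun i => 2 * (PySem.List.pyGet? m (k - i)).getD 0 + 2 ^ i.toNat - 1)) (fun x => x)).getD 0])
      ([0, 1] : List Int) = mSpec d := by
  intro n
  induction n with
  | zero =>
    intro d h2 hn
    have : d = 2 := by omega
    subst this
    rw [PySem.List.pyRange_one_eq_nil (by omega)]
    simp [mSpec, PySem.List.pyRange_one_eq_nil (by omega : (2:Int) ≤ 2)]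
  | succ n ih =>
    intro d h2 hn
    by_cases hd2 : d = 2
    · subst hd2
      rw [PySem.List.pyRange_one_eq_nil (by omega)]
      simp [mSpec, PySem.List.pyRange_one_eq_nil (by omega : (2:Int) ≤ 2)]
    · obtain ⟨e, rfl⟩ : ∃ e, d = e + 1 := ⟨d - 1, by omega⟩
      have he : 2 ≤ e := by omega
      rw [PySem.List.pyRange_one_succ_right (by omega : (2:Int) ≤ e), List.foldl_append,
        ih e he (by omega)]
      simp only [List.foldl_cons, List.foldl_nil]
      have hval : (PySem.List.min? ((PySem.List.pyRange 1 e 1).map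
          (fun i => 2 * (PySem.List.pyGet? (mSpec e) (e - i)).getD 0 + 2 ^ i.toNat - 1)) (fun x => x)).getD 0
          = optimal_moves e := by
        rw [optimal_moves_rec e he]
        congr 2
        apply List.map_congr_left
        intro i hi
        rw [PySem.List.mem_pyRange_one] at hi
        rw [mSpec_get e (e - i) (by omega) (by omega)]
      rw [hval]
      unfold mSpec
      rw [PySem.List.pyRange_one_succ_right (by omega : (2:Int) ≤ e), List.map_append]
      simp

theorem final_eq (disks : Int) (hpre : 1 ≤ disks) : optimal_i disks = optimal_i_alt disks := by
  by_cases h1 : disks = 1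
  · simp [h1, optimal_i, optimal_i_alt]
  · have h2 : 2 ≤ disks := by omega
    have hne : (disks == 1) = false := by simp [h1]
    have htab := foldl_table_aux (disks - 2).toNat disks h2 le_rfl
    have hc : (PySem.List.pyRange 1 disks 1).map
        (fun i => 2 * (PySem.List.pyGet? (mSpec disks) (disks - i)).getD 0 + 2 ^ i.toNat - 1)
        = (PySem.List.pyRange 1 disks 1).map
        (fun i => 2 * optimal_moves (disks - i) + 2 ^ i.toNat - 1) := by
      apply List.map_congr_left
      intro i hi
      rw [PySem.List.mem_pyRange_one] at hi
      rw [mSpec_get disks (disks - i) (by omega) (by omega)]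
    simp only [optimal_i, optimal_i_alt, hne, Bool.false_eq_true, if_false]
    simp only [htab, hc]
    set nl := (PySem.List.pyRange 1 disks 1).map
      (fun i => 2 * optimal_moves (disks - i) + 2 ^ i.toNat - 1) with hnl
    have hlen : nl.length = (disks - 1).toNat := by
      simp [hnl, PySem.List.length_pyRange_one]
    obtain ⟨mn, hmn⟩ : ∃ mn, PySem.List.min? nl (fun x => x) = some mn := by
      cases h : PySem.List.min? nl (fun x => x) with
      | none =>
        rw [PySem.List.min?_eq_none_iff] at h
        exfalso
        rw [h] at hlen
        simp at hlen
        omega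
      | some mn => exact ⟨mn, rfl⟩
    have hmem : mn ∈ nl := PySem.List.min?_mem hmn
    have hsome : (PySem.List.index? nl mn).isSome = true := by
      rw [PySem.List.index?_isSome_iff]; exact hmem
    obtain ⟨j, hj⟩ := Option.isSome_iff_exists.mp hsome
    obtain ⟨hjlt, -, -⟩ := PySem.List.getElem_of_index?_eq_some hj
    simp only [hmn, hj]
    rw [PySem.List.pyGet?_natCast, PySem.List.getElem?_pyRange_one, if_pos (by omega)]
    simp

-- ===== VERDICT (by name: the statement is the Claim_ definition above) =====
theorem optimal_i_spec : Claim_equal_optimal_i := by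
  intro disks _ hpre
  unfold Spec_optimal_i
  exact final_eq disks hpre
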